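-- pv_equiv track=rewrite | github.com/seongjinhong-ca/selfStudy | problemSolving/day1_2015/day1_2015_5.py | updateFloor
-- ===== SOURCE A (Python) =====
-- def updateFloor(i,currentFloor, numsStairs):
--     goUp = "("
--     if i == len(numsStairs):
--         return currentFloor
--     if numsStairs[i] == goUp:
--         currentFloor += 1
--         i += 1
--     else: # numsStairs[i] == ")":
--         currentFloor -= 1
--         i += 1
--     return updateFloor(i, currentFloor, numsStairs)
-- ===== SOURCE B (Python) =====
-- def updateFloor(i, currentFloor, numsStairs):
--     for j in range(i, len(numsStairs)):
--         currentFloor += 1 if numsStairs[j] == "(" else -1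
--     return currentFloor
-- ===== Notes on version B (the rewrite author's own statement) =====
-- stated objective: simpler
-- what changed: Replaced A's tail recursion with a single for-loop over range(i, len(numsStairs)) accumulating +1/-1 into currentFloor.
import Mathlib
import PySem

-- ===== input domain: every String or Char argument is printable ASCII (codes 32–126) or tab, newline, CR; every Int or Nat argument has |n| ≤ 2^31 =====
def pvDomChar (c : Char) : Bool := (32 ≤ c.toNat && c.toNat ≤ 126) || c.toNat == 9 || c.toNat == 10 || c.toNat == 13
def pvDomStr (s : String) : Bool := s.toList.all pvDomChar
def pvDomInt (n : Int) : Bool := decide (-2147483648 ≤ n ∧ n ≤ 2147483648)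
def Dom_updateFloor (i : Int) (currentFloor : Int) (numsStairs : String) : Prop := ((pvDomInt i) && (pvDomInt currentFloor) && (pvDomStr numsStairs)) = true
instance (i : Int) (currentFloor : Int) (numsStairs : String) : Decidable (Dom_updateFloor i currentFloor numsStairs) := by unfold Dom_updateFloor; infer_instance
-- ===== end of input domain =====

-- B replaces A's tail recursion with a single for-loop over range(i, len(numsStairs)); objective: simpler.

-- ===== PORT A =====
-- literal transliteration of A's recursion; 'none' from pyGet? is Python's IndexError (outside Pre_)
def updateFloor (i : Int) (currentFloor : Int) (numsStairs : String) : Int :=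
  if i = PySem.Str.len numsStairs then currentFloor
  else
    match h : PySem.Str.pyGet? numsStairs i with
    | none => currentFloor  -- Python raises IndexError here; excluded by Pre_
    | some c =>
      if c = '(' then updateFloor (i + 1) (currentFloor + 1) numsStairs
      else updateFloor (i + 1) (currentFloor - 1) numsStairs
termination_by (PySem.Str.len numsStairs - i).toNat
decreasing_by
  all_goals
    have h2 : ¬ PySem.List.pyGet? numsStairs.toList i = none := by
      simp [PySem.Str.pyGet?] at h ⊢; simp [h]
    rw [PySem.List.pyGet?_eq_none_iff, not_not, PySem.Raise.InRange] at h2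
    have hl : PySem.Str.len numsStairs = (numsStairs.toList.length : Int) := by
      simp [PySem.Str.len_eq]
    rw [hl]
    omega

-- ===== PORT B =====
-- for j in range(i, len(numsStairs)): currentFloor += 1 if numsStairs[j] == "(" else -1
-- (pyGetD's default is never used inside Pre_: every j in the range is then a valid index)
def updateFloor_alt (i : Int) (currentFloor : Int) (numsStairs : String) : Int :=
  (PySem.List.pyRange i (PySem.Str.len numsStairs) 1).foldl
    (fun acc j => acc + (if PySem.List.pyGetD numsStairs.toList j ' ' = '(' then 1 else -1))
    currentFloor

-- ===== PRECONDITION & SPEC =====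
-- Pre_ excludes exactly the inputs where A raises IndexError: i > len(numsStairs) (recursion
-- indexes past the end) and i < -len(numsStairs) (negative-index wraparound out of range).
def Pre_updateFloor (i : Int) (currentFloor : Int) (numsStairs : String) : Prop :=
  -(PySem.Str.len numsStairs) ≤ i ∧ i ≤ PySem.Str.len numsStairs
instance (i : Int) (currentFloor : Int) (numsStairs : String) : Decidable (Pre_updateFloor i currentFloor numsStairs) := by unfold Pre_updateFloor; infer_instance

def pvWitness_updateFloor : Int × Int × String := (0, 0, "(())(")

def Spec_updateFloor (i : Int) (currentFloor : Int) (numsStairs : String) (out : Int) : Prop := out = updateFloor_alt i currentFloor numsStairs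
instance (i : Int) (currentFloor : Int) (numsStairs : String) (out : Int) : Decidable (Spec_updateFloor i currentFloor numsStairs out) := by unfold Spec_updateFloor; infer_instance

-- ===== CLAIM (what is proved, stated in full; the proofs are below) =====
def Claim_equal_updateFloor : Prop := ∀ (i : Int) (currentFloor : Int) (numsStairs : String), Dom_updateFloor i currentFloor numsStairs → Pre_updateFloor i currentFloor numsStairs → Spec_updateFloor i currentFloor numsStairs (updateFloor i currentFloor numsStairs)

-- ===== LEMMAS AND PROOFS =====

theorem updateFloor_eq_alt (numsStairs : String) :
    ∀ (k : Nat) (i currentFloor : Int),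
      (PySem.Str.len numsStairs - i).toNat = k →
      -(PySem.Str.len numsStairs) ≤ i → i ≤ PySem.Str.len numsStairs →
      updateFloor i currentFloor numsStairs = updateFloor_alt i currentFloor numsStairs := by
  intro k
  induction k with
  | zero =>
    intro i cf hk h1 h2
    have hi : i = PySem.Str.len numsStairs := by omega
    rw [updateFloor, if_pos hi, updateFloor_alt, PySem.List.pyRange_one_eq_nil (by omega)]
    rfl
  | succ k ih =>
    intro i cf hk h1 h2
    have hlt : i < PySem.Str.len numsStairs := by omega
    have hne : ¬ i = PySem.Str.len numsStairs := by omega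
    have hlen : PySem.Str.len numsStairs = (numsStairs.toList.length : Int) := by
      simp [PySem.Str.len_eq]
    have hsl : numsStairs.toList.length = numsStairs.length := by simp
    have hin : PySem.Raise.InRange numsStairs.toList.length i := by
      simp [PySem.Raise.InRange]; omega
    obtain ⟨c, hc⟩ : ∃ c, PySem.List.pyGet? numsStairs.toList i = some c := by
      cases hg : PySem.List.pyGet? numsStairs.toList i with
      | none =>
        rw [PySem.List.pyGet?_eq_none_iff] at hg
        exact (hg hin).elim
      | some c => exact ⟨c, rfl⟩
    have hc' : PySem.Str.pyGet? numsStairs i = some c := by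
      simp [PySem.Str.pyGet?] at hc ⊢; simp [hc]
    have hgd : PySem.List.pyGetD numsStairs.toList i ' ' = c := by
      simp [PySem.List.pyGetD, hc]
    rw [updateFloor, if_neg hne, hc',
        updateFloor_alt, PySem.List.pyRange_one_cons hlt, List.foldl_cons, hgd]
    split
    next h => simp at h
    next c1 h =>
      injection h with h
      subst h
      by_cases hcp : c = '('
      · rw [if_pos hcp, if_pos hcp,
            ih (i + 1) (cf + 1) (by omega) (by omega) (by omega), updateFloor_alt]
      · rw [if_neg hcp, if_neg hcp,
            ih (i + 1) (cf - 1) (by omega) (by omega) (by omega), updateFloor_alt,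
            sub_eq_add_neg]

-- ===== VERDICT (by name: the statement is the Claim_ definition above) =====
theorem updateFloor_spec : Claim_equal_updateFloor := by
  intro i cf s _ hp
  exact updateFloor_eq_alt s _ i cf rfl hp.1 hp.2
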